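-- pv_equiv track=rewrite | github.com/Isaac-PM/vslm-subnet-calculator | cli_version/main.py | from_subnet_to_ip
-- ===== SOURCE A (Python) =====
-- def from_subnet_to_ip(subnet: int = 0) -> str:
--     if subnet < 0 or subnet > 32:
--         return ""
--     mask: str = ""
--     for i in range(32):
--         if i < subnet:
--             mask += "1"
--         else:
--             mask += "0"
--     return f"{int(mask[0:8], 2)}.{int(mask[8:16], 2)}.{int(mask[16:24], 2)}.{int(mask[24:32], 2)}"
-- ===== SOURCE B (Python) =====
-- def from_subnet_to_ip(subnet: int = 0) -> str:
--     if subnet < 0 or subnet > 32: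
--         return ""
--     mask = (0xFFFFFFFF << (32 - subnet)) & 0xFFFFFFFF
--     return f"{(mask >> 24) & 255}.{(mask >> 16) & 255}.{(mask >> 8) & 255}.{mask & 255}"
-- ===== Notes on version B (the rewrite author's own statement) =====
-- stated objective: idiomatic
-- what changed: Replaces building a binary character string and re-parsing its four slices with a single integer mask computed by one shift, whose octets are extracted with shifts and bit-masks.
import Mathlib
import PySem

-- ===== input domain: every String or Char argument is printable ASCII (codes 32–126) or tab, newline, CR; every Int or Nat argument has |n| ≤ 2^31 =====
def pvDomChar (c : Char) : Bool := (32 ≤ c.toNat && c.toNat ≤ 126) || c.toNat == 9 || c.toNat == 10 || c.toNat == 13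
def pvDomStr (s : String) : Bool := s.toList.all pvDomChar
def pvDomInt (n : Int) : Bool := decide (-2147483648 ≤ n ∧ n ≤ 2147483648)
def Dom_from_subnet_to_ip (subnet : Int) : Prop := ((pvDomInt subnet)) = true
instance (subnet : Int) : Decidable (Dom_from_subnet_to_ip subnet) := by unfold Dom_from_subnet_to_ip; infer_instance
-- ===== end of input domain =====

-- B replaces A's binary character string and its four int(.,2) re-parses by one shifted
-- integer mask whose four octets are extracted with shifts and bit-masks (idiomatic).

-- ===== PORT A =====
def from_subnet_to_ip (subnet : Int) : String :=
  if subnet < 0 ∨ subnet > 32 then ""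
  else
    -- for i in range(32): mask += "1" if i < subnet else "0"
    let mask : String :=
      (PySem.List.pyRange 0 32 1).foldl
        (fun m i => if i < subnet then m ++ "1" else m ++ "0") ""
    -- int(mask[a:b], 2): ofStrBase? never returns none here (the slice is 8 binary digits),
    -- so .getD 0 is exact on every admitted input
    PySem.Int.toStr ((PySem.Int.ofStrBase? (PySem.Str.slice mask (some 0) (some 8)) 2).getD 0)
      ++ "." ++
    PySem.Int.toStr ((PySem.Int.ofStrBase? (PySem.Str.slice mask (some 8) (some 16)) 2).getD 0)
      ++ "." ++
    PySem.Int.toStr ((PySem.Int.ofStrBase? (PySem.Str.slice mask (some 16) (some 24)) 2).getD 0)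
      ++ "." ++
    PySem.Int.toStr ((PySem.Int.ofStrBase? (PySem.Str.slice mask (some 24) (some 32)) 2).getD 0)

-- ===== PORT B =====
def from_subnet_to_ip_alt (subnet : Int) : String :=
  if subnet < 0 ∨ subnet > 32 then ""
  else
    -- 0 ≤ subnet ≤ 32 here, so (32 - subnet).toNat is exactly Python's 32 - subnet
    let mask : Nat := (0xFFFFFFFF <<< (32 - subnet).toNat) &&& 0xFFFFFFFF
    PySem.Int.toStr (((mask >>> 24) &&& 255 : Nat) : Int) ++ "." ++
    PySem.Int.toStr (((mask >>> 16) &&& 255 : Nat) : Int) ++ "." ++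
    PySem.Int.toStr (((mask >>> 8) &&& 255 : Nat) : Int) ++ "." ++
    PySem.Int.toStr ((mask &&& 255 : Nat) : Int)

-- ===== PRECONDITION & SPEC =====
def Spec_from_subnet_to_ip (subnet : Int) (out : String) : Prop := out = from_subnet_to_ip_alt subnet
instance (subnet : Int) (out : String) : Decidable (Spec_from_subnet_to_ip subnet out) := by unfold Spec_from_subnet_to_ip; infer_instance

-- ===== CLAIM (what is proved, stated in full; the proofs are below) =====
def Claim_equal_from_subnet_to_ip : Prop := ∀ (subnet : Int), Dom_from_subnet_to_ip subnet → Spec_from_subnet_to_ip subnet (from_subnet_to_ip subnet)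

-- ===== LEMMAS AND PROOFS =====
theorem eq_of_in_range (subnet : Int) (h0 : 0 ≤ subnet) (h32 : subnet ≤ 32) :
    from_subnet_to_ip subnet = from_subnet_to_ip_alt subnet := by
  interval_cases subnet <;> decide

-- ===== VERDICT (by name: the statement is the Claim_ definition above) =====
theorem from_subnet_to_ip_spec : Claim_equal_from_subnet_to_ip := by
  intro subnet _
  unfold Spec_from_subnet_to_ip
  by_cases h : subnet < 0 ∨ subnet > 32
  · simp [from_subnet_to_ip, from_subnet_to_ip_alt, h]
  · push Not at h
    exact eq_of_in_range subnet h.1 h.2
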